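-- pv_equiv track=rewrite | github.com/k33ngTomide/python_works | BatchA_Questions_Sk/least_common_multiples_Q19.py | get_common_multiples
-- ===== SOURCE A (Python) =====
-- def get_common_multiples(num1, num2):
--
--     multiples = 0
--     for counter in range(num1*num2 + 1):
--         if counter % num1 == 0 and counter % num2 == 0:
--             multiples = counter
--
--     if multiples == 0:
--         multiples = None
--     return f'The divisor is: {multiples}'
-- ===== SOURCE B (Python) =====
-- def get_common_multiples(num1, num2):
--     product = num1 * num2
--     return f'The divisor is: {product if product > 0 else None}'
-- ===== Notes on version B (the rewrite author's own statement) =====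
-- stated objective: faster
-- what changed: Replaced the O(num1*num2) scan of range(num1*num2+1) by the closed form: the largest common multiple up to the product is the product itself (or None when the product is not positive).
-- crash fix: When num1 == 0 or num2 == 0, A raises ZeroDivisionError at counter % num1; B returns 'The divisor is: None'. — e.g. on get_common_multiples(0, 5): A raises ZeroDivisionError, B returns "The divisor is: None"
import Mathlib
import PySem

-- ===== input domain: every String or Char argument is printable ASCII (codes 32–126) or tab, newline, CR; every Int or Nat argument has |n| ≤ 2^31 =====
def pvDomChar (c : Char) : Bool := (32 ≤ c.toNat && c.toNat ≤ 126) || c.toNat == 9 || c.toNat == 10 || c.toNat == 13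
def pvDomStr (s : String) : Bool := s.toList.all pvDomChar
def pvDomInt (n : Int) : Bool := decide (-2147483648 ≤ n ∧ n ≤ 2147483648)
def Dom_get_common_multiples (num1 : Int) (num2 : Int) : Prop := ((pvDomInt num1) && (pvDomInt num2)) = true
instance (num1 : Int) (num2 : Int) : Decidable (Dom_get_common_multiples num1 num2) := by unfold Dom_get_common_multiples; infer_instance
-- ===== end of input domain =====

-- B replaces A's O(num1*num2) scan by the closed form (the product itself, or None when it is not positive); objective: faster.

-- ===== PORT A =====
def get_common_multiples (num1 : Int) (num2 : Int) : String :=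
  let multiples : Int :=
    (PySem.List.pyRange 0 (num1 * num2 + 1) 1).foldl
      (fun multiples counter =>
        if PySem.Int.mod counter num1 == 0 && PySem.Int.mod counter num2 == 0 then counter
        else multiples) 0
  let m : Option Int := if multiples == 0 then none else some multiples
  "The divisor is: " ++ (match m with | none => "None" | some n => PySem.Int.toStr n)

-- ===== PORT B =====
def get_common_multiples_alt (num1 : Int) (num2 : Int) : String :=
  let product := num1 * num2
  "The divisor is: " ++ (if product > 0 then PySem.Int.toStr product else "None")

-- ===== PRECONDITION & SPEC =====
-- A divides by both arguments, so Pre_ excludes exactly num1 = 0 or num2 = 0, where A raises ZeroDivisionError.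
def Pre_get_common_multiples (num1 : Int) (num2 : Int) : Prop := num1 ≠ 0 ∧ num2 ≠ 0
instance (num1 : Int) (num2 : Int) : Decidable (Pre_get_common_multiples num1 num2) := by
  unfold Pre_get_common_multiples; infer_instance
def pvWitness_get_common_multiples : Int × Int := (3, 4)

-- When num1 == 0 or num2 == 0, A raises ZeroDivisionError at counter % num1; B returns 'The divisor is: None'.
def Raises_get_common_multiples (num1 : Int) (num2 : Int) : Prop := num1 = 0 ∨ num2 = 0
instance (num1 : Int) (num2 : Int) : Decidable (Raises_get_common_multiples num1 num2) := by
  unfold Raises_get_common_multiples; infer_instance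
def pvRaiseWitness_get_common_multiples : Int × Int := (0, 5)
def pvRaiseWitnessOut_get_common_multiples : String := "The divisor is: None"

def Spec_get_common_multiples (num1 : Int) (num2 : Int) (out : String) : Prop :=
  out = get_common_multiples_alt num1 num2
instance (num1 : Int) (num2 : Int) (out : String) : Decidable (Spec_get_common_multiples num1 num2 out) := by
  unfold Spec_get_common_multiples; infer_instance

-- ===== CLAIM (what is proved, stated in full; the proofs are below) =====
def Claim_equal_get_common_multiples : Prop := ∀ (num1 : Int) (num2 : Int), Dom_get_common_multiples num1 num2 → Pre_get_common_multiples num1 num2 → Spec_get_common_multiples num1 num2 (get_common_multiples num1 num2)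

def Claim_raises_get_common_multiples : Prop := (∀ (num1 : Int) (num2 : Int), Dom_get_common_multiples num1 num2 → Raises_get_common_multiples num1 num2 → ¬ Pre_get_common_multiples num1 num2) ∧ (Dom_get_common_multiples (pvRaiseWitness_get_common_multiples.1) (pvRaiseWitness_get_common_multiples.2) ∧ Raises_get_common_multiples (pvRaiseWitness_get_common_multiples.1) (pvRaiseWitness_get_common_multiples.2) ∧ get_common_multiples_alt (pvRaiseWitness_get_common_multiples.1) (pvRaiseWitness_get_common_multiples.2) = pvRaiseWitnessOut_get_common_multiples)

-- ===== LEMMAS AND PROOFS =====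

-- ===== VERDICT (by name: the statement is the Claim_ definition above) =====
theorem get_common_multiples_spec : Claim_equal_get_common_multiples := by
  intro num1 num2 _ hpre
  obtain ⟨h1, h2⟩ := hpre
  unfold Spec_get_common_multiples get_common_multiples get_common_multiples_alt
  rcases lt_trichotomy (num1 * num2) 0 with hlt | heq | hgt
  · -- product < 0: the range is empty, the loop never runs
    rw [PySem.List.pyRange_one_eq_nil (by omega)]
    simp [not_lt.mpr (le_of_lt hlt)]
  · exact absurd heq (mul_ne_zero h1 h2)
  · -- product > 0: split off the last element, which is a common multiple
    rw [PySem.List.pyRange_one_succ_right (by omega), List.foldl_append]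
    have hm1 : PySem.Int.mod (num1 * num2) num1 = 0 :=
      (PySem.Int.mod_eq_zero_iff_dvd _ _).mpr ⟨num2, rfl⟩
    have hm2 : PySem.Int.mod (num1 * num2) num2 = 0 :=
      (PySem.Int.mod_eq_zero_iff_dvd _ _).mpr ⟨num1, (mul_comm num1 num2)⟩
    simp [hm1, hm2, hgt, h1, h2]

@[simp] theorem get_common_multiples_raises : Claim_raises_get_common_multiples := by
  unfold Claim_raises_get_common_multiples
  constructor
  · intro num1 num2 _ hr hp
    unfold Pre_get_common_multiples at hp
    unfold Raises_get_common_multiples at hr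
    tauto
  · exact ⟨by decide, by decide, by decide⟩
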